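-- pv_equiv track=rewrite | github.com/MrBrantCode/unitest_baseline | mut_generate/mist_train_taco/taco_1444/solution.py | is_next_month_fortunate
-- ===== SOURCE A (Python) =====
-- def is_next_month_fortunate(n, moods):
--     def gen_prime(n):
--         prime = []
--         prime.append(2)
--         prime.append(3)
--         for i in range(5, n + 1):
--             div = False
--             for j in prime:
--                 if not i % j:
--                     div = True
--                     break
--             if not div:
--                 prime.append(i)
--         return prime
--
--     prime = gen_prime(n)
--     prime = prime[1:]
--     prime.append(n)
--
--     possible = False
--     for i in prime:
--         if not n % i:
--             found = False
--             l = n // i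
--             for k in range(0, l):
--                 mood = True
--                 for j in range(k, n, l):
--                     if not moods[j]:
--                         mood = False
--                         break
--                 if mood:
--                     found = True
--                     break
--             if found:
--                 possible = True
--                 break
--
--     return 'YES' if possible else 'NO'
-- ===== SOURCE B (Python) =====
-- def is_next_month_fortunate(n, moods):
--     def ok(i):
--         l = n // i
--         return any(all(moods[j] for j in range(k, n, l)) for k in range(l))
--
--     if ok(n):
--         return 'YES'
--     for i in range(3, n + 1, 2):
--         if n % i == 0 and ok(i):
--             return 'YES'
--     return 'NO'
-- ===== Notes on version B (the rewrite author's own statement) =====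
-- stated objective: faster
-- what changed: B drops A's quadratic prime-list generation entirely: it first tests the full-column candidate (divisor n), then scans the odd numbers 3..n keeping only divisors of n and tests their columns, relying on the fact that a column success for a composite odd divisor implies one for each of its odd prime factors.
-- outside the precondition, e.g. on is_next_month_fortunate(6, [6, -1, 8, 4, 4]): A returns 'YES', B raises IndexError; on is_next_month_fortunate(9, [1, 0, 0, 1, 0, 0, 1]): A returns 'YES', B returns 'YES'
import Mathlib
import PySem

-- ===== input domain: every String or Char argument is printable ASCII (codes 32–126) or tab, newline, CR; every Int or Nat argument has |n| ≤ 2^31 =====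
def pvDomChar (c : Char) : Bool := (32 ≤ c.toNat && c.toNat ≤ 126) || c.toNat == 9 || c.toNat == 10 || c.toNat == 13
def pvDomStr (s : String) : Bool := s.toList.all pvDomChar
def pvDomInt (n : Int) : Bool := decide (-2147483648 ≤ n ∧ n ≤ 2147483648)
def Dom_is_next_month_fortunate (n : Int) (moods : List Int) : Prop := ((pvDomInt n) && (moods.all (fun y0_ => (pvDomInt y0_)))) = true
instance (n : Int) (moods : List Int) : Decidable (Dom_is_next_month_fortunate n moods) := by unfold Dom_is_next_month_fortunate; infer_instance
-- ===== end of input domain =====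

-- B replaces A's quadratic generation of ALL primes up to n by a direct scan of the odd
-- candidate divisors of n (testing the full-column candidate n first); objective: faster.

-- ===== PORT A =====
-- helper: Python's inner `def gen_prime(n)`
def pvGenPrime (n : Int) : List Int :=
  (PySem.List.pyRange 5 (n + 1) 1).foldl
    (fun p i => if p.any (fun j => PySem.Int.mod i j == 0) then p else p ++ [i])
    [2, 3]

def is_next_month_fortunate (n : Int) (moods : List Int) : String :=
  -- prime = gen_prime(n); prime = prime[1:]; prime.append(n)
  let prime := (pvGenPrime n).drop 1 ++ [n]
  -- the for-loop with `possible`/`found`/`mood` flags and breaks, as any/all over the same ranges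
  let possible := prime.any (fun i =>
    PySem.Int.mod n i == 0 &&
      (let l := PySem.Int.floordiv n i
       (PySem.List.pyRange 0 l 1).any (fun k =>
         (PySem.List.pyRange k n l).all (fun j => PySem.List.pyGetD moods j 0 != 0))))
  if possible then "YES" else "NO"

-- ===== PORT B =====
-- helper: B's inner `def ok(i)`
def pvOk (n : Int) (moods : List Int) (i : Int) : Bool :=
  -- l = n // i, inlined
  (PySem.List.pyRange 0 (PySem.Int.floordiv n i) 1).any (fun k =>
    (PySem.List.pyRange k n (PySem.Int.floordiv n i)).all
      (fun j => PySem.List.pyGetD moods j 0 != 0))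

def is_next_month_fortunate_alt (n : Int) (moods : List Int) : String :=
  if pvOk n moods n then "YES"
  else if (PySem.List.pyRange 3 (n + 1) 2).any
            (fun i => PySem.Int.mod n i == 0 && pvOk n moods i) then "YES"
  else "NO"

-- ===== PRECONDITION & SPEC =====
-- Pre_ excludes n = 0 (A raises ZeroDivisionError) and 0 < n with fewer than n moods,
-- where both programs index moods out of range (usually an IndexError; occasionally A
-- still returns before reaching the out-of-range index, depending on candidate order).
def Pre_is_next_month_fortunate (n : Int) (moods : List Int) : Prop :=
  n ≠ 0 ∧ (0 < n → n ≤ (moods.length : Int))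
instance (n : Int) (moods : List Int) : Decidable (Pre_is_next_month_fortunate n moods) := by
  unfold Pre_is_next_month_fortunate; infer_instance

def pvWitness_is_next_month_fortunate : Int × List Int := (2, [1, 0])

def Spec_is_next_month_fortunate (n : Int) (moods : List Int) (out : String) : Prop := out = is_next_month_fortunate_alt n moods
instance (n : Int) (moods : List Int) (out : String) : Decidable (Spec_is_next_month_fortunate n moods out) := by unfold Spec_is_next_month_fortunate; infer_instance

-- ===== CLAIM (what is proved, stated in full; the proofs are below) =====
def Claim_equal_is_next_month_fortunate : Prop := ∀ (n : Int) (moods : List Int), Dom_is_next_month_fortunate n moods → Pre_is_next_month_fortunate n moods → Spec_is_next_month_fortunate n moods (is_next_month_fortunate n moods)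

-- ===== LEMMAS AND PROOFS =====

-- two positive primes that divide each other are equal
lemma pv_prime_dvd_eq (p q : Int) (hp : Prime p) (hq : Prime q)
    (hpp : 0 < p) (hqp : 0 < q) (h : p ∣ q) : p = q := by
  have hp' : p.natAbs.Prime := Int.prime_iff_natAbs_prime.mp hp
  have hq' : q.natAbs.Prime := Int.prime_iff_natAbs_prime.mp hq
  have hd : p.natAbs ∣ q.natAbs := Int.natAbs_dvd_natAbs.mpr h
  have := (Nat.prime_dvd_prime_iff_eq hp' hq').mp hd
  omega

-- the smallest prime factor of i, as an Int
lemma pv_minFac_facts (i : Int) (hi : 2 ≤ i) :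
    ∃ p : Int, Prime p ∧ 2 ≤ p ∧ p ≤ i ∧ p ∣ i ∧ (¬ Prime i → p < i) := by
  have h1 : i.toNat ≠ 1 := by omega
  have hq : i.toNat.minFac.Prime := Nat.minFac_prime h1
  refine ⟨(i.toNat.minFac : Int), ?_, ?_, ?_, ?_, ?_⟩
  · exact Int.prime_iff_natAbs_prime.mpr (by simpa using hq)
  · exact_mod_cast hq.two_le
  · have := Nat.minFac_le (n := i.toNat) (by omega); omega
  · have h := Nat.minFac_dvd i.toNat
    have : (i.toNat.minFac : Int) ∣ (i.toNat : Int) := Int.natCast_dvd_natCast.mpr h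
    rwa [Int.toNat_of_nonneg (by omega)] at this
  · intro hnp
    have hle : i.toNat.minFac ≤ i.toNat := Nat.minFac_le (by omega)
    have hne : i.toNat.minFac ≠ i.toNat := by
      intro h
      apply hnp
      have : i.toNat.Prime := Nat.prime_def_minFac.mpr ⟨by omega, h⟩
      have hna : i.natAbs = i.toNat := by omega
      exact Int.prime_iff_natAbs_prime.mpr (hna ▸ this)
    omega

-- trial division against all primes below i decides primality of i (i ≥ 5)
lemma pv_prime_test (i : Int) (hi : 5 ≤ i) :
    (∃ j, (j = 2 ∨ j = 3 ∨ (5 ≤ j ∧ j ≤ i - 1 ∧ Prime j)) ∧ j ∣ i) ↔ ¬ Prime i := by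
  constructor
  · rintro ⟨j, hj, hdvd⟩ hprime
    have hjfacts : Prime j ∧ 2 ≤ j ∧ j ≤ i - 1 := by
      rcases hj with rfl | rfl | ⟨h5, hle, hp⟩
      · exact ⟨Int.prime_two, by omega, by omega⟩
      · exact ⟨Int.prime_three, by omega, by omega⟩
      · exact ⟨hp, by omega, hle⟩
    have := pv_prime_dvd_eq j i hjfacts.1 hprime (by omega) (by omega) hdvd
    omega
  · intro hnp
    obtain ⟨p, hp, h2, hle, hdvd, hlt⟩ := pv_minFac_facts i (by omega)
    have hlt' : p < i := hlt hnp
    refine ⟨p, ?_, hdvd⟩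
    by_cases h2' : p = 2
    · exact Or.inl h2'
    by_cases h3 : p = 3
    · exact Or.inr (Or.inl h3)
    have h4 : p ≠ 4 := by
      intro h; rw [h] at hp
      exact (by decide : ¬ Nat.Prime 4) (by simpa using Int.prime_iff_natAbs_prime.mp hp)
    exact Or.inr (Or.inr ⟨by omega, by omega, hp⟩)

-- the fold only appends, and appends only elements of the traversed list
lemma pv_fold_shape (l : List Int) : ∀ acc : List Int,
    ∃ t, l.foldl (fun p i => if p.any (fun j => PySem.Int.mod i j == 0) then p else p ++ [i]) acc
          = acc ++ t ∧ ∀ x ∈ t, x ∈ l := by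
  induction l with
  | nil => intro acc; exact ⟨[], by simp⟩
  | cons a l ih =>
    intro acc
    simp only [List.foldl_cons]
    by_cases h : acc.any (fun j => PySem.Int.mod a j == 0)
    · rw [if_pos h]
      obtain ⟨t, ht, hmem⟩ := ih acc
      exact ⟨t, ht, fun x hx => List.mem_cons_of_mem _ (hmem x hx)⟩
    · rw [if_neg h]
      obtain ⟨t, ht, hmem⟩ := ih (acc ++ [a])
      refine ⟨[a] ++ t, by simpa using ht, ?_⟩
      intro x hx
      rcases List.mem_append.mp hx with hx | hx
      · simp at hx; simp [hx]
      · exact List.mem_cons_of_mem _ (hmem x hx)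

lemma pv_genPrime_base (n : Int) (h : n ≤ 4) : pvGenPrime n = [2, 3] := by
  unfold pvGenPrime
  rw [PySem.List.pyRange_one_eq_nil (by omega)]
  rfl

lemma pv_genPrime_succ (n : Int) (h : 4 ≤ n) :
    pvGenPrime (n + 1) =
      (if (pvGenPrime n).any (fun j => PySem.Int.mod (n + 1) j == 0)
        then pvGenPrime n else pvGenPrime n ++ [n + 1]) := by
  unfold pvGenPrime
  rw [PySem.List.pyRange_one_succ_right (by omega : (5:Int) ≤ n + 1), List.foldl_append]
  simp

lemma pv_mem_genPrime_aux (m : Nat) : ∀ x : Int,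
    x ∈ pvGenPrime (4 + (m : Int)) ↔
      x = 2 ∨ x = 3 ∨ (5 ≤ x ∧ x ≤ 4 + (m : Int) ∧ Prime x) := by
  induction m with
  | zero =>
    intro x
    rw [pv_genPrime_base _ (by norm_num)]
    simp only [List.mem_cons, List.not_mem_nil, or_false]
    constructor
    · tauto
    · rintro (h | h | h) <;> first | tauto | omega
  | succ k ih =>
    intro x
    have h1 : (4 + ((k + 1 : Nat)) : Int) = (4 + (k : Int)) + 1 := by push_cast; ring
    rw [h1, pv_genPrime_succ _ (by omega)]
    have hcond : ((pvGenPrime (4 + (k : Int))).any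
        (fun j => PySem.Int.mod ((4 + (k : Int)) + 1) j == 0)) = true
        ↔ ¬ Prime ((4 + (k : Int)) + 1) := by
      rw [List.any_eq_true]
      rw [← pv_prime_test ((4 + (k : Int)) + 1) (by omega)]
      constructor
      · rintro ⟨j, hj, hdvd⟩
        refine ⟨j, ?_, ?_⟩
        · have := (ih j).mp hj
          rcases this with h | h | h
          · tauto
          · tauto
          · exact Or.inr (Or.inr ⟨h.1, by omega, h.2.2⟩)
        · simpa [PySem.Int.mod_eq_zero_iff_dvd] using hdvd
      · rintro ⟨j, hj, hdvd⟩
        refine ⟨j, ?_, ?_⟩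
        · apply (ih j).mpr
          rcases hj with h | h | h
          · tauto
          · tauto
          · exact Or.inr (Or.inr ⟨h.1, by omega, h.2.2⟩)
        · simpa [PySem.Int.mod_eq_zero_iff_dvd] using hdvd
    by_cases hc : ((pvGenPrime (4 + (k : Int))).any
        (fun j => PySem.Int.mod ((4 + (k : Int)) + 1) j == 0)) = true
    · rw [if_pos hc]
      have hnp : ¬ Prime ((4 + (k : Int)) + 1) := hcond.mp hc
      rw [ih x]
      constructor
      · rintro (h | h | h)
        · tauto
        · tauto
        · refine Or.inr (Or.inr ⟨h.1, by omega, h.2.2⟩)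
      · rintro (h | h | h)
        · tauto
        · tauto
        · refine Or.inr (Or.inr ⟨h.1, ?_, h.2.2⟩)
          rcases eq_or_lt_of_le h.2.1 with heq | hlt
          · exact absurd (heq ▸ h.2.2) hnp
          · omega
    · rw [if_neg hc]
      have hp : Prime ((4 + (k : Int)) + 1) := by
        by_contra hnp
        exact hc (hcond.mpr hnp)
      rw [List.mem_append, ih x]
      constructor
      · rintro ((h | h | h) | h)
        · tauto
        · tauto
        · exact Or.inr (Or.inr ⟨h.1, by omega, h.2.2⟩)
        · simp at h
          exact Or.inr (Or.inr ⟨by omega, by omega, h ▸ hp⟩)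
      · rintro (h | h | h)
        · tauto
        · tauto
        · rcases eq_or_lt_of_le h.2.1 with heq | hlt
          · exact Or.inr (by simp [heq])
          · exact Or.inl (Or.inr (Or.inr ⟨h.1, by omega, h.2.2⟩))

lemma pv_mem_genPrime (n x : Int) :
    x ∈ pvGenPrime n ↔ x = 2 ∨ x = 3 ∨ (5 ≤ x ∧ x ≤ n ∧ Prime x) := by
  by_cases h : n ≤ 4
  · rw [pv_genPrime_base n h]
    simp only [List.mem_cons, List.not_mem_nil, or_false]
    constructor
    · tauto
    · rintro (hx | hx | hx) <;> first | tauto | omega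
  · have hm := pv_mem_genPrime_aux (n - 4).toNat x
    rwa [show (4 + ((n - 4).toNat : Int)) = n by omega] at hm

lemma pv_mem_drop1 (n x : Int) :
    x ∈ (pvGenPrime n).drop 1 ↔ x = 3 ∨ (5 ≤ x ∧ x ≤ n ∧ Prime x) := by
  obtain ⟨t, ht, h5⟩ := pv_fold_shape (PySem.List.pyRange 5 (n + 1) 1) [2, 3]
  have hg : pvGenPrime n = [2, 3] ++ t := ht
  have ht5 : ∀ x ∈ t, (5 : Int) ≤ x := by
    intro x hx
    have := h5 x hx
    exact (PySem.List.mem_pyRange_one.mp this).1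
  rw [hg]
  simp only [List.cons_append, List.nil_append, List.drop_succ_cons, List.drop_zero,
    List.mem_cons]
  constructor
  · rintro (rfl | hx)
    · exact Or.inl rfl
    · have hx' : x ∈ pvGenPrime n := by rw [hg]; simp [hx]
      rcases (pv_mem_genPrime n x).mp hx' with rfl | rfl | h
      · have := ht5 _ hx; omega
      · have := ht5 _ hx; omega
      · exact Or.inr h
  · rintro (rfl | h)
    · exact Or.inl rfl
    · have hx' : x ∈ pvGenPrime n := (pv_mem_genPrime n x).mpr (Or.inr (Or.inr h))
      rw [hg] at hx'
      rcases List.mem_append.mp hx' with hx | hx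
      · simp at hx; omega
      · exact Or.inr hx

-- column monotonicity: a winning column for divisor i is a winning column for any
-- positive divisor p of i (the residue class mod n//p refines the class mod n//i)
lemma pv_ok_of_dvd (n : Int) (moods : List Int) (p i : Int)
    (hn : 0 < n) (hp : 0 < p) (hi : 0 < i) (hpi : p ∣ i) (hin : i ∣ n)
    (hok : pvOk n moods i = true) : pvOk n moods p = true := by
  have hfl : PySem.Int.floordiv n i = n / i := PySem.Int.floordiv_eq_ediv_of_pos hi
  have hfl' : PySem.Int.floordiv n p = n / p := PySem.Int.floordiv_eq_ediv_of_pos hp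
  have hil : i * (n / i) = n := Int.mul_ediv_cancel' hin
  have hpl' : p * (n / p) = n := Int.mul_ediv_cancel' (dvd_trans hpi hin)
  have hlpos : 0 < n / i := by
    by_contra h
    nlinarith [mul_nonpos_of_nonneg_of_nonpos (le_of_lt hi) (not_lt.mp h)]
  have hl'pos : 0 < n / p := by
    by_contra h
    nlinarith [mul_nonpos_of_nonneg_of_nonpos (le_of_lt hp) (not_lt.mp h)]
  obtain ⟨c, hc⟩ := hpi
  have hcl : n / p = c * (n / i) := by
    apply mul_left_cancel₀ (show p ≠ 0 by omega)
    calc p * (n / p) = n := hpl'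
      _ = i * (n / i) := hil.symm
      _ = p * c * (n / i) := congrArg (fun x => x * (n / i)) hc
      _ = p * (c * (n / i)) := by ring
  have hdvd_ll' : (n / i) ∣ (n / p) := ⟨c, by rw [hcl]; ring⟩
  have hle : n / i ≤ n / p := Int.le_of_dvd hl'pos hdvd_ll'
  unfold pvOk at hok ⊢
  rw [hfl] at hok
  rw [hfl']
  rw [List.any_eq_true] at hok ⊢
  obtain ⟨k, hkmem, hkall⟩ := hok
  have hk := PySem.List.mem_pyRange_one.mp hkmem
  refine ⟨k, PySem.List.mem_pyRange_one.mpr ⟨hk.1, by omega⟩, ?_⟩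
  rw [List.all_eq_true] at hkall ⊢
  intro j hj
  have hj' := (PySem.List.mem_pyRange_iff_of_pos hl'pos j).mp hj
  apply hkall
  exact (PySem.List.mem_pyRange_iff_of_pos hlpos j).mpr
    ⟨hj'.1, hj'.2.1, dvd_trans hdvd_ll' hj'.2.2⟩

lemma pv_ok_self_neg (n : Int) (moods : List Int) (hn : n < 0) :
    pvOk n moods n = true := by
  unfold pvOk
  have h1 : PySem.Int.floordiv n n = 1 := by
    have h := PySem.Int.floordiv_neg_neg (-n) (-n)
    simp only [neg_neg] at h
    rw [h, PySem.Int.floordiv_eq_ediv_of_pos (by omega : (0:Int) < -n),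
      Int.ediv_self (by omega)]
  rw [h1]
  have h2 : PySem.List.pyRange 0 1 1 = [0] := by decide
  rw [h2]
  simp [PySem.List.pyRange_one_eq_nil (by omega : n ≤ 0)]

-- B's result written as a single conditional
lemma pv_alt_eq (n : Int) (moods : List Int) :
    is_next_month_fortunate_alt n moods =
      if (pvOk n moods n ||
          (PySem.List.pyRange 3 (n + 1) 2).any
            (fun i => PySem.Int.mod n i == 0 && pvOk n moods i)) then "YES" else "NO" := by
  unfold is_next_month_fortunate_alt
  cases pvOk n moods n <;> simp


-- A's result with the candidate test named
lemma pv_a_eq (n : Int) (moods : List Int) :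
    is_next_month_fortunate n moods =
      if (((pvGenPrime n).drop 1 ++ [n]).any
            (fun i => PySem.Int.mod n i == 0 && pvOk n moods i)) then "YES" else "NO" := rfl

-- ===== VERDICT (by name: the statement is the Claim_ definition above) =====
theorem is_next_month_fortunate_spec : Claim_equal_is_next_month_fortunate := by
  intro n moods _hdom hpre
  obtain ⟨hn0, _hlen⟩ := hpre
  unfold Spec_is_next_month_fortunate
  rw [pv_a_eq, pv_alt_eq]
  have hmodnn : (PySem.Int.mod n n == 0) = true := by
    simp [PySem.Int.mod_eq_zero_iff_dvd]
  by_cases hn : 0 < n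
  · -- positive n
    rw [List.any_append]
    have hsingle : ([n].any (fun i => PySem.Int.mod n i == 0 && pvOk n moods i))
        = pvOk n moods n := by simp [hmodnn]
    simp only [hsingle]
    congr 1
    -- booleans: Tany || Cn = Cn || Rany
    have fwd : ((pvGenPrime n).drop 1).any (fun i => PySem.Int.mod n i == 0 && pvOk n moods i) = true →
        (PySem.List.pyRange 3 (n + 1) 2).any (fun i => PySem.Int.mod n i == 0 && pvOk n moods i) = true := by
      intro h
      rw [List.any_eq_true] at h ⊢
      obtain ⟨i, hiT, hpi⟩ := h
      have hpi' := hpi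
      rw [Bool.and_eq_true] at hpi'
      obtain ⟨hm, hok⟩ := hpi'
      have hdvd : i ∣ n := (PySem.Int.mod_eq_zero_iff_dvd n i).mp (by simpa using hm)
      refine ⟨i, ?_, hpi⟩
      apply (PySem.List.mem_pyRange_iff_of_pos (by norm_num : (0:Int) < 2) i).mpr
      rcases (pv_mem_drop1 n i).mp hiT with rfl | ⟨h5, hle, hp⟩
      · have h3n : (3:Int) ≤ n := Int.le_of_dvd hn hdvd
        refine ⟨by omega, by omega, by omega⟩
      · have hodd : ¬ (2:Int) ∣ i := by
          intro h2
          have := pv_prime_dvd_eq 2 i Int.prime_two hp (by norm_num) (by omega) h2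
          omega
        refine ⟨by omega, by omega, by omega⟩
    have bwd : (PySem.List.pyRange 3 (n + 1) 2).any (fun i => PySem.Int.mod n i == 0 && pvOk n moods i) = true →
        pvOk n moods n = false →
        ((pvGenPrime n).drop 1).any (fun i => PySem.Int.mod n i == 0 && pvOk n moods i) = true := by
      intro h _
      rw [List.any_eq_true] at h ⊢
      obtain ⟨i, hiR, hpi⟩ := h
      have hi := (PySem.List.mem_pyRange_iff_of_pos (by norm_num : (0:Int) < 2) i).mp hiR
      rw [Bool.and_eq_true] at hpi
      obtain ⟨hm, hok⟩ := hpi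
      have hdvd : i ∣ n := (PySem.Int.mod_eq_zero_iff_dvd n i).mp (by simpa using hm)
      obtain ⟨p, hp, hp2, hple, hpdvd, _⟩ := pv_minFac_facts i (by omega)
      have hpodd : p ≠ 2 := by
        rintro rfl
        have : (2:Int) ∣ i - 3 := hi.2.2
        obtain ⟨c, hc⟩ := hpdvd
        omega
      have hp4 : p ≠ 4 := by
        intro h; rw [h] at hp
        exact (by decide : ¬ Nat.Prime 4) (by simpa using Int.prime_iff_natAbs_prime.mp hp)
      refine ⟨p, ?_, ?_⟩
      · apply (pv_mem_drop1 n p).mpr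
        by_cases h3 : p = 3
        · exact Or.inl h3
        · exact Or.inr ⟨by omega, by omega, hp⟩
      · rw [Bool.and_eq_true]
        constructor
        · have : p ∣ n := dvd_trans hpdvd hdvd
          simpa [PySem.Int.mod_eq_zero_iff_dvd] using this
        · exact pv_ok_of_dvd n moods p i hn (by omega) (by omega) hpdvd hdvd hok
    cases hC : pvOk n moods n
    · cases hT : ((pvGenPrime n).drop 1).any (fun i => PySem.Int.mod n i == 0 && pvOk n moods i)
      · cases hR : (PySem.List.pyRange 3 (n + 1) 2).any (fun i => PySem.Int.mod n i == 0 && pvOk n moods i)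
        · rfl
        · have := bwd hR hC; rw [hT] at this; exact absurd this (by simp)
      · have := fwd hT; simp [this]
    · simp
  · -- negative n
    have hneg : n < 0 := by omega
    have hokn : pvOk n moods n = true := pv_ok_self_neg n moods hneg
    rw [pv_genPrime_base n (by omega)]
    simp only [List.drop_succ_cons, List.drop_zero, List.cons_append, List.nil_append]
    have : ([(3:Int), n].any (fun i => PySem.Int.mod n i == 0 && pvOk n moods i)) = true := by
      apply List.any_eq_true.mpr
      exact ⟨n, by simp, by simp [hmodnn, hokn]⟩
    simp [this, hokn]
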